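-- pv_equiv track=rewrite | github.com/ADiko1997/Language-Segmentation | Code/preprocessing.py | make_vocabulary1
-- ===== SOURCE A (Python) =====
-- def make_vocabulary1(n_gram, n):
--     """
--     Makes the vocabularies of uni and bi grams based on the input value of n
--     """
--     vocab={'UNK':0}
--     for i in n_gram:
--         if i not in vocab:
--             if n == 2 :
--                 vocab[i]  = len(vocab) + 1422  #5168 is the len of vocab of unigrams so the numbers does not repeat
--             else:
--                 vocab[i] = len(vocab)
--     return vocab
-- ===== SOURCE B (Python) =====
-- def make_vocabulary1(n_gram, n):
--     """Set + sort-based ranking: collect the distinct non-'UNK' words as a set,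
--     rank them by their first-occurrence position in n_gram (sorted with key
--     n_gram.index, injective on the set), and assign rank+offset."""
--     offset = 1422 if n == 2 else 0
--     words = sorted(set(n_gram) - {'UNK'}, key=n_gram.index)
--     vocab = {'UNK': 0}
--     for i, w in enumerate(words):
--         vocab[w] = i + 1 + offset
--     return vocab
-- ===== Notes on version B (the rewrite author's own statement) =====
-- stated objective: alternative
-- what changed: A's streaming loop (membership test against the growing dict, value = running len) is replaced by a set-and-sort ranking: build the set of distinct non-'UNK' words, sort it by first-occurrence position (key=n_gram.index, injective on the set), and assign each word rank+1+offset.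
import Mathlib
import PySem

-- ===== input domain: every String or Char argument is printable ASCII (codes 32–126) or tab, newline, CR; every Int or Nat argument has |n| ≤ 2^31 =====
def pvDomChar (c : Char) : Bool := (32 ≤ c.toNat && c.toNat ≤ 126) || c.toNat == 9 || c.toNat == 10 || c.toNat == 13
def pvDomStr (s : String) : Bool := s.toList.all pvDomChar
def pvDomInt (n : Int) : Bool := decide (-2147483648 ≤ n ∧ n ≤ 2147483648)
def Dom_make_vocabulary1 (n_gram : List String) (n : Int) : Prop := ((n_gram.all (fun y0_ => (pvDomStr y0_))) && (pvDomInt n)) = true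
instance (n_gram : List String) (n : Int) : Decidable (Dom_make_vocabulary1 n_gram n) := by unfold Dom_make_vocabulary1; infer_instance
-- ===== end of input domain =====

-- B replaces A's streaming loop (membership test against the growing dict, value = running len)
-- by a set-and-sort ranking: the set of distinct non-'UNK' words, sorted by first-occurrence
-- position (key = n_gram.index, injective on the set), each word getting rank+1+offset
-- (objective: alternative).

-- ===== PORT A =====
def make_vocabulary1 (n_gram : List String) (n : Int) : List (String × Int) :=
  let vocab : PySem.Dict String Int := PySem.Dict.ofList [("UNK", 0)]
  let vocab := n_gram.foldl (fun vocab i =>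
    if vocab.contains i = false then
      if n == 2 then
        vocab.insert i ((vocab.size : Int) + 1422)
      else
        vocab.insert i ((vocab.size : Int))
    else vocab) vocab
  vocab.items

-- ===== PORT B =====
def make_vocabulary1_alt (n_gram : List String) (n : Int) : List (String × Int) :=
  let offset : Int := if n == 2 then 1422 else 0
  -- sorted(set(n_gram) - {'UNK'}, key=n_gram.index): Python's set iterates in arbitrary
  -- order, but the key is injective on the set, so sorting PySem.Set.ofList is exact;
  -- n_gram.index never raises here (every sorted word is a member), so .getD 0 is exact.
  let words : List String :=
    PySem.List.sorted ((PySem.Set.ofList n_gram : List String).filter (fun w => w != "UNK"))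
      (fun w => (PySem.List.index? n_gram w).getD 0) false
  let vocab : PySem.Dict String Int := PySem.Dict.ofList [("UNK", 0)]
  ((PySem.List.enumerate words).foldl (fun vocab p => vocab.insert p.2 (p.1 + 1 + offset)) vocab).items

-- ===== PRECONDITION & SPEC =====
def Spec_make_vocabulary1 (n_gram : List String) (n : Int) (out : List (String × Int)) : Prop := out = make_vocabulary1_alt n_gram n
instance (n_gram : List String) (n : Int) (out : List (String × Int)) : Decidable (Spec_make_vocabulary1 n_gram n out) := by unfold Spec_make_vocabulary1; infer_instance

-- ===== CLAIM (what is proved, stated in full; the proofs are below) =====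
def Claim_equal_make_vocabulary1 : Prop := ∀ (n_gram : List String) (n : Int), Dom_make_vocabulary1 n_gram n → Spec_make_vocabulary1 n_gram n (make_vocabulary1 n_gram n)

-- ===== LEMMAS AND PROOFS =====

-- ordered dedup of an extension by one element
lemma dedup_append_mem {x : String} (l : List String) (h : x ∈ l) :
    PySem.List.dedup (l ++ [x]) = PySem.List.dedup l := by
  have hm : x ∈ List.foldl PySem.Set.add [] l := by
    have h2 : x ∈ PySem.List.dedup l := (PySem.List.mem_dedup _ _).mpr h
    simpa [PySem.List.dedup_eq_ofList, PySem.Set.ofList] using h2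
  simp [PySem.List.dedup_eq_ofList, PySem.Set.ofList, List.foldl_append, PySem.Set.add, hm]

lemma dedup_append_not_mem {x : String} (l : List String) (h : x ∉ l) :
    PySem.List.dedup (l ++ [x]) = PySem.List.dedup l ++ [x] := by
  have hm : x ∉ List.foldl PySem.Set.add [] l := by
    intro hc
    exact h ((PySem.List.mem_dedup _ _).mp (by simpa [PySem.List.dedup_eq_ofList, PySem.Set.ofList] using hc))
  simp [PySem.List.dedup_eq_ofList, PySem.Set.ofList, List.foldl_append, PySem.Set.add, hm]

-- dedup lists first occurrences in order: it is strictly increasing under first-occurrence index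
lemma dedup_pairwise_idx (xs : List String) :
    (PySem.List.dedup xs).Pairwise
      (fun a b => (PySem.List.index? xs a).getD 0 < (PySem.List.index? xs b).getD 0) := by
  induction xs using List.reverseRecOn with
  | nil => simp [PySem.List.dedup_eq_ofList, PySem.Set.ofList]
  | append_singleton xs x ih =>
    by_cases hmem : x ∈ xs
    · rw [dedup_append_mem xs hmem]
      refine ih.imp_of_mem ?_
      intro a b ha hb hlt
      have ha' : a ∈ xs := (PySem.List.mem_dedup _ _).mp ha
      have hb' : b ∈ xs := (PySem.List.mem_dedup _ _).mp hb
      rw [PySem.List.index?_append_of_mem _ ha', PySem.List.index?_append_of_mem _ hb']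
      exact hlt
    · rw [dedup_append_not_mem xs hmem, List.pairwise_append]
      refine ⟨?_, by simp, ?_⟩
      · refine ih.imp_of_mem ?_
        intro a b ha hb hlt
        have ha' : a ∈ xs := (PySem.List.mem_dedup _ _).mp ha
        have hb' : b ∈ xs := (PySem.List.mem_dedup _ _).mp hb
        rw [PySem.List.index?_append_of_mem _ ha', PySem.List.index?_append_of_mem _ hb']
        exact hlt
      · intro a ha b hb
        have ha' : a ∈ xs := (PySem.List.mem_dedup _ _).mp ha
        have hbx : b = x := by simpa using hb
        subst hbx
        obtain ⟨k, hk⟩ := Option.isSome_iff_exists.mp ((PySem.List.index?_isSome_iff _ _).mpr ha')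
        obtain ⟨hklt, -, -⟩ := PySem.List.getElem_of_index?_eq_some hk
        rw [PySem.List.index?_append_of_mem _ ha', PySem.List.index?_append_singleton_self xs _ hmem, hk]
        simpa using hklt

-- dedup commutes with filter
lemma filter_dedup (p : String → Bool) (xs : List String) :
    (PySem.List.dedup xs).filter p = PySem.List.dedup (xs.filter p) := by
  induction xs using List.reverseRecOn with
  | nil => rfl
  | append_singleton xs x ih =>
    by_cases hp : p x = true
    · by_cases hmem : x ∈ xs
      · have hmf : x ∈ xs.filter p := List.mem_filter.mpr ⟨hmem, hp⟩
        have hfx : List.filter p [x] = [x] := by simp [hp]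
        rw [dedup_append_mem xs hmem, List.filter_append, hfx,
          dedup_append_mem (xs.filter p) hmf]
        exact ih
      · have hmf : x ∉ xs.filter p := fun hc => hmem (List.mem_of_mem_filter hc)
        have hfx : List.filter p [x] = [x] := by simp [hp]
        rw [dedup_append_not_mem xs hmem, List.filter_append, hfx, List.filter_append, hfx,
          dedup_append_not_mem (xs.filter p) hmf, ih]
    · have hfil : (xs ++ [x]).filter p = xs.filter p := by
        simp [List.filter_append, hp]
      rw [hfil, ← ih]
      by_cases hmem : x ∈ xs
      · rw [dedup_append_mem xs hmem]
      · rw [dedup_append_not_mem xs hmem]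
        simp [List.filter_append, hp]

-- B's words list = the deduped non-'UNK' stream in first-occurrence order
lemma words_eq_dedup (n_gram : List String) :
    PySem.List.sorted ((PySem.Set.ofList n_gram : List String).filter (fun w => w != "UNK"))
      (fun w => (PySem.List.index? n_gram w).getD 0) false
    = PySem.List.dedup (n_gram.filter (fun w => w != "UNK")) := by
  have hofl : (PySem.Set.ofList n_gram : List String) = PySem.List.dedup n_gram := by
    rw [PySem.List.dedup_eq_ofList]
  rw [hofl]
  have hpw : ((PySem.List.dedup n_gram).filter (fun w => w != "UNK")).Pairwise
      (fun a b => (PySem.List.index? n_gram a).getD 0 < (PySem.List.index? n_gram b).getD 0) :=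
    (dedup_pairwise_idx n_gram).filter _
  have := PySem.List.sorted_eq_of_perm_of_pairwise_lt
    (xs := (PySem.List.dedup n_gram).filter (fun w => w != "UNK"))
    (ys := (PySem.List.dedup n_gram).filter (fun w => w != "UNK"))
    (key := fun w => (PySem.List.index? n_gram w).getD 0)
    (List.Perm.refl _) hpw
  rw [this, filter_dedup]

-- A's loop, characterised: its items are ("UNK",0) followed by the deduped non-'UNK' words,
-- numbered by position (+1, + the n-dependent offset).
lemma make_vocabulary1_loop (n : Int) (xs : List String) :
    (xs.foldl (fun vocab i =>
      if vocab.contains i = false then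
        if n == 2 then
          vocab.insert i ((vocab.size : Int) + 1422)
        else
          vocab.insert i ((vocab.size : Int))
      else vocab) (PySem.Dict.ofList [("UNK", 0)])).items
    = ("UNK", (0 : Int)) ::
        (PySem.List.enumerate (PySem.List.dedup (xs.filter (fun w => w != "UNK")))).map
          (fun p => (p.2, p.1 + 1 + (if n == 2 then (1422 : Int) else 0))) := by
  induction xs using List.reverseRecOn with
  | nil => rfl
  | append_singleton xs x ih =>
    rw [List.foldl_append, List.foldl_cons, List.foldl_nil]
    set d := (xs.foldl (fun vocab i =>
      if vocab.contains i = false then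
        if n == 2 then
          vocab.insert i ((vocab.size : Int) + 1422)
        else
          vocab.insert i ((vocab.size : Int))
      else vocab) (PySem.Dict.ofList [("UNK", 0)])) with hd
    by_cases hUNK : x = "UNK"
    · subst hUNK
      have hc : d.contains "UNK" = true := by
        show (d.items.any fun q => q.1 == "UNK") = true
        rw [ih]
        simp
      have hfil : (xs ++ ["UNK"]).filter (fun w => w != "UNK")
          = xs.filter (fun w => w != "UNK") := by simp
      rw [hc]
      simp only [Bool.true_eq_false, if_false, hfil]
      exact ih
    · have hfil : (xs ++ [x]).filter (fun w => w != "UNK")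
          = xs.filter (fun w => w != "UNK") ++ [x] := by
        simp [List.filter_append, hUNK]
      set D := PySem.List.dedup (xs.filter (fun w => w != "UNK")) with hD
      have hded : PySem.List.dedup ((xs ++ [x]).filter (fun w => w != "UNK"))
          = PySem.Set.add D x := by
        rw [hfil, hD]
        simp [PySem.List.dedup_eq_ofList, PySem.Set.ofList, List.foldl_append]
      by_cases hmem : x ∈ D
      · have hc : d.contains x = true := by
          show (d.items.any fun q => q.1 == x) = true
          rw [ih]
          simp only [List.any_cons, List.any_map, Bool.or_eq_true, List.any_eq_true]
          refine Or.inr ?_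
          have hx : x ∈ (PySem.List.enumerate D).map (fun p => p.2) := by
            rw [PySem.List.map_snd_enumerate]
            exact hmem
          obtain ⟨p, hp, hpx⟩ := List.mem_map.mp hx
          exact ⟨p, hp, by simp [hpx]⟩
        have haddk : PySem.Set.add D x = D := by simp [PySem.Set.add, hmem]
        rw [hc]
        simp only [Bool.true_eq_false, if_false, hded, haddk]
        exact ih
      · have hmf : d.contains x = false := by
          show (d.items.any fun q => q.1 == x) = false
          rw [ih]
          simp only [List.any_cons, List.any_map, Bool.or_eq_false_iff, List.any_eq_false]
          constructor
          · exact beq_eq_false_iff_ne.mpr (Ne.symm hUNK)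
          · intro p hp h
            apply hmem
            rw [← PySem.List.map_snd_enumerate D 0]
            exact List.mem_map.mpr ⟨p, hp, by simpa using h⟩
        have haddk : PySem.Set.add D x = (D : List String) ++ [x] := by
          simp [PySem.Set.add, hmem]
        have hsz : d.size = D.length + 1 := by
          show d.items.length = D.length + 1
          rw [ih]
          simp [PySem.List.length_enumerate]
        have henum : PySem.List.enumerate ((D : List String) ++ [x])
            = PySem.List.enumerate D ++ [((D.length : Int), x)] := by
          rw [PySem.List.enumerate_append]
          simp [PySem.List.enumerate_cons, PySem.List.enumerate_nil]
        rw [hmf, hded, haddk, henum, if_pos rfl]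
        by_cases hn : (n == 2) = true
        · rw [if_pos hn, PySem.Dict.items_insert_of_not_contains _ _ hmf, ih, hsz]
          simp only [hn, if_true, List.map_append, List.map_cons, List.map_nil,
            List.cons_append]
          push_cast
          ring_nf
        · rw [if_neg hn, PySem.Dict.items_insert_of_not_contains _ _ hmf, ih, hsz]
          simp only [hn, Bool.false_eq_true, if_false, List.map_append, List.map_cons,
            List.map_nil, List.cons_append]
          push_cast
          ring_nf

theorem make_vocabulary1_spec : Claim_equal_make_vocabulary1 := by
  intro n_gram n _
  show make_vocabulary1 n_gram n = make_vocabulary1_alt n_gram n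
  simp only [make_vocabulary1, make_vocabulary1_alt]
  rw [make_vocabulary1_loop, words_eq_dedup]
  have h1 : ∀ p ∈ PySem.List.enumerate (PySem.List.dedup (n_gram.filter (fun w => w != "UNK"))),
      (PySem.Dict.ofList [("UNK", (0 : Int))]).contains p.2 = false := by
    intro p hp
    have hx : p.2 ∈ PySem.List.dedup (n_gram.filter (fun w => w != "UNK")) := by
      rw [← PySem.List.map_snd_enumerate (PySem.List.dedup (n_gram.filter (fun w => w != "UNK"))) 0]
      exact List.mem_map.mpr ⟨p, hp, rfl⟩
    have hx2 : p.2 ∈ n_gram.filter (fun w => w != "UNK") := (PySem.List.mem_dedup _ _).mp hx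
    have hne : p.2 ≠ "UNK" := by
      have hf := List.of_mem_filter hx2
      simpa using hf
    have hofl : (PySem.Dict.ofList [("UNK", (0 : Int))]) = PySem.Dict.mk [("UNK", 0)] := rfl
    rw [hofl]
    simp [Ne.symm hne]
  have h2 : ((PySem.List.enumerate (PySem.List.dedup (n_gram.filter (fun w => w != "UNK")))).map
      (fun p => p.2)).Nodup := by
    rw [PySem.List.map_snd_enumerate]
    exact PySem.List.nodup_dedup _
  rw [PySem.Dict.items_foldl_insert_fresh _ _ _ _ h1 h2]
  rfl
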